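-- pv_equiv track=rewrite | github.com/seedCoining/Seed_Coins | seed_gen.py | challenge_sum_nums_prime
-- ===== SOURCE A (Python) =====
-- def challenge_sum_nums_prime(wallet_address):
-- 	decision = False
-- 	prime_total = 0
-- 	div_flag = 0
-- 	count = 0
-- 	for index in wallet_address:
-- 		if(ord(index)>=48 and ord(index)<=57):
-- 			prime_total += int(index)
-- 	for index in range(1,prime_total):
-- 		if(prime_total%index == 0):
-- 			count += 1
-- 	if(count == 2):
-- 		decision = True
--
-- 	return decision
-- ===== SOURCE B (Python) =====
-- def challenge_sum_nums_prime(wallet_address):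
--     total = 0
--     for d in '0123456789':
--         total += (ord(d) - 48) * wallet_address.count(d)
--     cnt = 0
--     d = 1
--     while d * d <= total:
--         if total % d == 0:
--             cnt += 1 if d * d == total else 2
--         d += 1
--     return cnt == 3
-- ===== Notes on version B (the rewrite author's own statement) =====
-- stated objective: faster
-- what changed: B computes the digit sum S with ten C-level str.count scans instead of a per-character Python loop, and counts divisors of S by trial division only up to sqrt(S) (pairing each divisor with its cofactor, testing for 3 total divisors) instead of scanning all of range(1, S).
import Mathlib
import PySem

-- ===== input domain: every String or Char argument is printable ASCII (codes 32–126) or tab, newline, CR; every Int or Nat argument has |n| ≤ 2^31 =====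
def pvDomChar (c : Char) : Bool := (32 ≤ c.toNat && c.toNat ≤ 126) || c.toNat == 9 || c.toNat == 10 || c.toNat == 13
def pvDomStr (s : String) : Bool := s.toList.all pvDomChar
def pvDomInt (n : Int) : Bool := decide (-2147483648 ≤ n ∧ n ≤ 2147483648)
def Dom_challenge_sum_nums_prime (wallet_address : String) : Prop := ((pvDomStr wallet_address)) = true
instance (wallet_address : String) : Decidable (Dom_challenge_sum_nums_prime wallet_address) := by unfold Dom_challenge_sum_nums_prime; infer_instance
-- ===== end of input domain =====

-- B replaces A's O(S) scan over range(1, digit-sum S) by trial division up to sqrt(S),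
-- counting divisor/cofactor pairs (objective: faster, asymptotic).


-- ===== PORT A =====
def challenge_sum_nums_prime (wallet_address : String) : Bool :=
  let prime_total : Int := wallet_address.toList.foldl
    (fun acc c => if 48 ≤ c.toNat ∧ c.toNat ≤ 57 then acc + ((c.toNat : Int) - 48) else acc) 0
  let count : Int := (PySem.List.pyRange 1 prime_total 1).foldl
    (fun cnt i => if PySem.Int.mod prime_total i == 0 then cnt + 1 else cnt) 0
  if count == 2 then true else false

-- ===== PORT B =====
def pvAltLoop (s d cnt : Nat) : Nat :=
  if d * d ≤ s then
    pvAltLoop s (d + 1) (cnt + if s % d = 0 then (if d * d = s then 1 else 2) else 0)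
  else cnt
termination_by s + 1 - d
decreasing_by
  have h2 : d ≤ d * d := by
    rcases Nat.eq_zero_or_pos d with h0 | h0
    · simp [h0]
    · exact Nat.le_mul_of_pos_left d h0
  omega

def challenge_sum_nums_prime_alt (wallet_address : String) : Bool :=
  let total : Nat := ("0123456789".toList).foldl
    (fun acc d => acc + (d.toNat - 48) * PySem.Str.count wallet_address (String.ofList [d])) 0
  pvAltLoop total 1 0 == 3

-- ===== PRECONDITION & SPEC =====
def Spec_challenge_sum_nums_prime (wallet_address : String) (out : Bool) : Prop := out = challenge_sum_nums_prime_alt wallet_address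
instance (wallet_address : String) (out : Bool) : Decidable (Spec_challenge_sum_nums_prime wallet_address out) := by unfold Spec_challenge_sum_nums_prime; infer_instance

-- ===== CLAIM (what is proved, stated in full; the proofs are below) =====
def Claim_equal_challenge_sum_nums_prime : Prop := ∀ (wallet_address : String), Dom_challenge_sum_nums_prime wallet_address → Spec_challenge_sum_nums_prime wallet_address (challenge_sum_nums_prime wallet_address)

-- ===== LEMMAS AND PROOFS =====

-- the summand of B's trial-division loop
def pvF (s k : Nat) : Nat := if s % k = 0 then (if k * k = s then 1 else 2) else 0

-- the divisors of s that lie in [1, s] (for s ≥ 1: all divisors)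
def pvDivs (s : Nat) : Finset Nat := (Finset.Ico 1 (s + 1)).filter (fun d => d ∣ s)

-- A's digit-sum fold equals B's (Nat-valued) digit-sum fold
theorem pv_digit_sum_eq (cs : List Char) (a : Nat) :
    cs.foldl (fun acc c => if 48 ≤ c.toNat ∧ c.toNat ≤ 57 then acc + ((c.toNat : Int) - 48) else acc) (a : Int)
      = ((cs.foldl (fun acc c => if '0' ≤ c ∧ c ≤ '9' then acc + (c.toNat - 48) else acc) a : Nat) : Int) := by
  induction cs generalizing a with
  | nil => rfl
  | cons c cs ih =>
    have hcond : ('0' ≤ c ∧ c ≤ '9') ↔ (48 ≤ c.toNat ∧ c.toNat ≤ 57) := Iff.rfl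
    simp only [List.foldl_cons]
    by_cases h : 48 ≤ c.toNat ∧ c.toNat ≤ 57
    · rw [if_pos h, if_pos (hcond.mpr h)]
      have : (a : Int) + ((c.toNat : Int) - 48) = ((a + (c.toNat - 48) : Nat) : Int) := by
        push_cast [Nat.cast_sub h.1]; ring
      rw [this, ih]
    · rw [if_neg h, if_neg (fun hh => h (hcond.mp hh)), ih]


-- Python's str.count with a single-character needle is List.count of that character
theorem pv_count_go_single (c : Char) (cs : List Char) : ∀ (fuel acc : Nat), cs.length ≤ fuel →
    PySem.Chars.count.go [c] fuel cs acc = acc + cs.count c := by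
  induction cs with
  | nil => intro fuel acc _; cases fuel <;> simp [PySem.Chars.count.go]
  | cons h t ih =>
    intro fuel acc hf
    cases fuel with
    | zero => simp at hf
    | succ n =>
      show (if [c].isPrefixOf (h::t) then PySem.Chars.count.go [c] n (List.drop 1 (h::t)) (acc+1)
            else PySem.Chars.count.go [c] n t acc) = acc + (h::t).count c
      simp only [List.length_cons, Nat.add_le_add_iff_right] at hf
      have hc' : (¬ h = c) → ¬ c = h := fun a b => a b.symm
      by_cases hc : h = c
      · rw [if_pos (by simp [List.isPrefixOf, hc])]
        simp only [List.drop_one, List.tail_cons]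
        rw [ih n (acc+1) hf, List.count_cons]
        simp [hc]; omega
      · rw [if_neg (by simp [List.isPrefixOf]; exact hc' hc)]
        rw [ih n acc hf, List.count_cons]
        simp [hc]

theorem pv_count_single (w : String) (c : Char) :
    PySem.Str.count w (String.ofList [c]) = w.toList.count c := by
  rw [PySem.Str.count_eq]
  have h1 : (String.ofList [c]).toList = [c] := by simp
  rw [h1]
  simp only [PySem.Chars.count, List.isEmpty_cons, Bool.false_eq_true, if_false]
  simpa using pv_count_go_single c w.toList w.toList.length 0 le_rfl

theorem pv_char_eq_iff (c d : Char) : c = d ↔ c.toNat = d.toNat :=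
  ⟨fun h => by rw [h], fun h => Char.ext (UInt32.toNat_inj.mp h)⟩

-- one character's contribution to the ten per-digit counts
theorem pv_count_cons_sum (c : Char) (t : List Char) :
    (("0123456789".toList).map (fun d => (d.toNat - 48) * (c::t).count d)).sum
      = (if '0' ≤ c ∧ c ≤ '9' then c.toNat - 48 else 0)
        + (("0123456789".toList).map (fun d => (d.toNat - 48) * t.count d)).sum := by
  have hd : ("0123456789".toList) = ['0','1','2','3','4','5','6','7','8','9'] := rfl
  have hcond : ('0' ≤ c ∧ c ≤ '9') ↔ (48 ≤ c.toNat ∧ c.toNat ≤ 57) := Iff.rfl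
  rw [hd]
  simp only [List.map_cons, List.map_nil, List.sum_cons, List.sum_nil, List.count_cons,
    beq_iff_eq, pv_char_eq_iff]
  simp only [show ('0'.toNat) = 48 from rfl, show ('1'.toNat) = 49 from rfl, show ('2'.toNat) = 50 from rfl, show ('3'.toNat) = 51 from rfl, show ('4'.toNat) = 52 from rfl, show ('5'.toNat) = 53 from rfl, show ('6'.toNat) = 54 from rfl, show ('7'.toNat) = 55 from rfl, show ('8'.toNat) = 56 from rfl, show ('9'.toNat) = 57 from rfl]
  rw [if_congr hcond rfl rfl]
  by_cases h : 48 ≤ c.toNat ∧ c.toNat ≤ 57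
  · obtain ⟨h1, h2⟩ := h
    set n := c.toNat with hn
    interval_cases n <;> simp <;> omega
  · rw [if_neg h]
    set n := c.toNat with hn
    rw [if_neg (by omega : ¬ n = 48), if_neg (by omega : ¬ n = 49), if_neg (by omega : ¬ n = 50),
        if_neg (by omega : ¬ n = 51), if_neg (by omega : ¬ n = 52), if_neg (by omega : ¬ n = 53),
        if_neg (by omega : ¬ n = 54), if_neg (by omega : ¬ n = 55), if_neg (by omega : ¬ n = 56),
        if_neg (by omega : ¬ n = 57)]
    omega

-- the per-character digit-sum fold equals the sum of the ten per-digit count contributions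
theorem pv_charfold_eq (cs : List Char) : ∀ (acc : Nat),
    cs.foldl (fun acc c => if '0' ≤ c ∧ c ≤ '9' then acc + (c.toNat - 48) else acc) acc
      = acc + (("0123456789".toList).map (fun d => (d.toNat - 48) * cs.count d)).sum := by
  induction cs with
  | nil => intro acc; simp
  | cons c t ih =>
    intro acc
    rw [List.foldl_cons, ih, pv_count_cons_sum]
    split_ifs <;> omega

-- B's total (ten str.count scans) equals A's per-character digit sum
theorem pv_total_eq (w : String) :
    w.toList.foldl (fun acc c => if '0' ≤ c ∧ c ≤ '9' then acc + (c.toNat - 48) else acc) 0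
      = ("0123456789".toList).foldl
          (fun acc d => acc + (d.toNat - 48) * PySem.Str.count w (String.ofList [d])) 0 := by
  rw [PySem.List.foldl_add_nat, pv_charfold_eq w.toList 0]
  simp only [pv_count_single]

-- bridge: Finset.filter of a range counts like List.countP of List.range
theorem pv_card_filter_range (n : Nat) (p : Nat → Bool) :
    ((Finset.range n).filter (fun k => p k)).card = (List.range n).countP p := by
  induction n with
  | zero => simp
  | succ m ih =>
    rw [Finset.range_add_one, List.range_succ, List.countP_append, Finset.filter_insert]
    by_cases h : p m <;> simp [h, ih, Finset.card_insert_of_notMem]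

-- A's divisor-counting loop counts the divisors of S below S
theorem pv_acount_eq (S : Nat) :
    (PySem.List.pyRange 1 (S : Int) 1).foldl
        (fun cnt i => if PySem.Int.mod (S : Int) i == 0 then cnt + 1 else cnt) (0 : Int)
      = (((Finset.Ico 1 S).filter (fun d => d ∣ S)).card : Int) := by
  rw [PySem.List.foldl_if_add_one, PySem.List.pyRange_one, List.countP_map]
  have h1 : ((S : Int) - 1).toNat = S - 1 := by omega
  rw [h1]
  have hfun : ((fun i => PySem.Int.mod (S : Int) i == 0) ∘ (fun k : Nat => (1 : Int) + k))
      = fun k : Nat => decide ((1 + k) ∣ S) := by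
    funext k
    simp only [Function.comp_apply]
    have hiff : PySem.Int.mod (S : Int) (1 + (k : Int)) = 0 ↔ (1 + k) ∣ S := by
      rw [PySem.Int.mod_eq_zero_iff_dvd]
      constructor
      · intro h; exact_mod_cast h
      · intro h; exact_mod_cast h
    show decide _ = decide _
    exact decide_eq_decide.mpr hiff
  rw [hfun]
  have h3 : ((Finset.Ico 1 S).filter (fun d => d ∣ S)).card
      = ((Finset.range (S - 1)).filter (fun k => decide ((1 + k) ∣ S))).card := by
    apply Finset.card_nbij (i := fun d => d - 1)
    · intro d hd
      simp only [Finset.coe_filter, Finset.mem_Ico, Set.mem_setOf_eq] at hd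
      simp only [Finset.coe_filter, Finset.mem_range, Set.mem_setOf_eq]
      refine ⟨by omega, ?_⟩
      have he : 1 + (d - 1) = d := by omega
      rw [he]; simpa using hd.2
    · intro d1 h1' d2 h2' he
      simp only [Finset.coe_filter, Finset.mem_Ico, Set.mem_setOf_eq] at h1' h2'
      dsimp only at he
      omega
    · intro k hk
      simp only [Finset.coe_filter, Finset.mem_range, Set.mem_setOf_eq] at hk
      refine ⟨1 + k, ?_, by dsimp only; omega⟩
      simp only [Finset.coe_filter, Finset.mem_Ico, Set.mem_setOf_eq]
      exact ⟨⟨by omega, by omega⟩, by simpa using hk.2⟩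
  rw [h3, pv_card_filter_range]
  simp

-- B's loop accumulates pvF over the remaining small candidates d, d+1, ..., sqrt s
theorem pv_altLoop_eq (s d cnt : Nat) :
    pvAltLoop s d cnt = cnt + ∑ k ∈ Finset.Ico d (Nat.sqrt s + 1), pvF s k := by
  fun_induction pvAltLoop s d cnt with
  | case1 d cnt h ih =>
    have hd : d < Nat.sqrt s + 1 := by
      have := Nat.le_sqrt.mpr h; omega
    simp only [dite_eq_ite] at ih
    rw [ih, Finset.sum_eq_sum_Ico_succ_bot hd]
    simp only [pvF]
    split_ifs <;> omega
  | case2 d cnt h =>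
    have hd : Nat.sqrt s + 1 ≤ d := by
      by_contra hc
      exact h (Nat.le_sqrt.mp (by omega))
    rw [Finset.Ico_eq_empty (by omega), Finset.sum_empty]
    omega

-- membership in pvDivs, for S ≥ 1
theorem pv_mem_divs (S d : Nat) (hS : 1 ≤ S) : d ∈ pvDivs S ↔ (d ∣ S ∧ 1 ≤ d) := by
  simp only [pvDivs, Finset.mem_filter, Finset.mem_Ico]
  constructor
  · rintro ⟨⟨h1, _⟩, h3⟩; exact ⟨h3, h1⟩
  · rintro ⟨h3, h1⟩
    exact ⟨⟨h1, by have := Nat.le_of_dvd (by omega) h3; omega⟩, h3⟩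

-- the pairing argument: summing pvF up to sqrt S counts ALL divisors of S (S ≥ 1)
theorem pv_pairing (S : Nat) (hS : 1 ≤ S) :
    ∑ k ∈ Finset.Ico 1 (Nat.sqrt S + 1), pvF S k = (pvDivs S).card := by
  set r := Nat.sqrt S with hrdef
  have hr2 : r * r ≤ S := Nat.sqrt_le S
  have hrS : S < (r + 1) * (r + 1) := Nat.lt_succ_sqrt S
  have hrpos : 1 ≤ r := by
    have := Nat.sqrt_pos.mpr (show 0 < S by omega); omega
  have hS0 : S ≠ 0 := by omega
  -- small divisors, as a filter of pvDivs
  have hsmall : (Finset.Ico 1 (r + 1)).filter (fun k => k ∣ S)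
      = (pvDivs S).filter (fun d => d ≤ r) := by
    ext d
    simp only [Finset.mem_filter, Finset.mem_Ico, pv_mem_divs S d hS]
    constructor
    · rintro ⟨⟨h1, h2⟩, h3⟩; exact ⟨⟨h3, h1⟩, by omega⟩
    · rintro ⟨⟨h3, h1⟩, h4⟩; exact ⟨⟨h1, by omega⟩, h3⟩
  -- rewrite the sum as (#small) + (#small with k*k ≠ S)
  have hstep1 : ∑ k ∈ Finset.Ico 1 (r + 1), pvF S k
      = ((pvDivs S).filter (fun d => d ≤ r)).card
        + ((pvDivs S).filter (fun d => d ≤ r ∧ d * d ≠ S)).card := by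
    have e1 : ∑ k ∈ Finset.Ico 1 (r + 1), pvF S k
        = ∑ k ∈ (Finset.Ico 1 (r + 1)).filter (fun k => k ∣ S),
            (if k * k = S then 1 else 2) := by
      rw [Finset.sum_filter]
      apply Finset.sum_congr rfl
      intro k hk
      simp only [Finset.mem_Ico] at hk
      simp only [pvF]
      have hmk : S % k = 0 ↔ k ∣ S := (Nat.dvd_iff_mod_eq_zero).symm
      by_cases h : k ∣ S
      · rw [if_pos (hmk.mpr h), if_pos h]
      · rw [if_neg (fun hh => h (hmk.mp hh)), if_neg h]
    rw [e1, hsmall]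
    calc ∑ k ∈ (pvDivs S).filter (fun d => d ≤ r), (if k * k = S then (1:Nat) else 2)
        = ∑ k ∈ (pvDivs S).filter (fun d => d ≤ r), (1 + (if k * k = S then 0 else 1)) := by
          apply Finset.sum_congr rfl
          intro k _; split_ifs <;> rfl
      _ = ((pvDivs S).filter (fun d => d ≤ r)).card
            + ∑ k ∈ (pvDivs S).filter (fun d => d ≤ r), (if k * k = S then 0 else 1) := by
          rw [Finset.sum_add_distrib, Finset.sum_const, smul_eq_mul, mul_one]
      _ = ((pvDivs S).filter (fun d => d ≤ r)).card
            + ((pvDivs S).filter (fun d => d ≤ r ∧ d * d ≠ S)).card := by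
          congr 1
          rw [← Finset.filter_filter, Finset.card_filter]
          apply Finset.sum_congr rfl
          intro k _
          by_cases h : k * k = S <;> simp [h]
  -- the pairing d ↦ S / d matches the strict small divisors with the large ones
  have hbij : ((pvDivs S).filter (fun d => d ≤ r ∧ d * d ≠ S)).card
      = ((pvDivs S).filter (fun d => ¬ d ≤ r)).card := by
    apply Finset.card_nbij (i := fun d => S / d)
    · -- maps to
      intro d hd
      simp only [Finset.coe_filter, Set.mem_setOf_eq, pv_mem_divs S _ hS] at hd ⊢
      obtain ⟨⟨hdvd, hd1⟩, hdr, hdsq⟩ := hd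
      have hq : S / d ∣ S := Nat.div_dvd_of_dvd hdvd
      have hdc : S / d * d = S := Nat.div_mul_cancel hdvd
      have hq1 : 1 ≤ S / d :=
        (Nat.one_le_div_iff (by omega)).mpr (Nat.le_of_dvd (by omega) hdvd)
      refine ⟨⟨hq, hq1⟩, ?_⟩
      have hle : r ≤ S / d := by
        have ha : S / r ≤ S / d := Nat.div_le_div_left hdr (by omega)
        have hb : r ≤ S / r := (Nat.le_div_iff_mul_le (by omega)).mpr hr2
        omega
      rcases eq_or_lt_of_le hle with heq | hlt
      · exfalso
        have hrd : r * d = S := by rw [heq]; exact hdc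
        have hmm : r * r ≤ r * d := by omega
        have hrd2 : r ≤ d := Nat.le_of_mul_le_mul_left hmm (by omega)
        have hdr' : d = r := le_antisymm hdr hrd2
        rw [hdr'] at hdsq hrd
        exact hdsq hrd
      · omega
    · -- injective
      intro d1 hd1 d2 hd2 he
      simp only [Finset.coe_filter, Set.mem_setOf_eq, pv_mem_divs S _ hS] at hd1 hd2
      dsimp only at he
      have e1 : S / (S / d1) = d1 := Nat.div_div_self hd1.1.1 hS0
      have e2 : S / (S / d2) = d2 := Nat.div_div_self hd2.1.1 hS0
      rw [← e1, ← e2, he]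
    · -- surjective
      intro e he
      simp only [Finset.coe_filter, Set.mem_setOf_eq, pv_mem_divs S _ hS] at he
      obtain ⟨⟨hdvd, he1⟩, her⟩ := he
      have hre : r + 1 ≤ e := by omega
      refine ⟨S / e, ?_, by dsimp only; exact Nat.div_div_self hdvd hS0⟩
      simp only [Finset.coe_filter, Set.mem_setOf_eq, pv_mem_divs S _ hS]
      have hq : S / e ∣ S := Nat.div_dvd_of_dvd hdvd
      have hdc : S / e * e = S := Nat.div_mul_cancel hdvd
      have hq1 : 1 ≤ S / e :=
        (Nat.one_le_div_iff (by omega)).mpr (Nat.le_of_dvd (by omega) hdvd)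
      refine ⟨⟨hq, hq1⟩, ?_, ?_⟩
      · have hlt : S / e < r + 1 := by
          rw [Nat.div_lt_iff_lt_mul (show 0 < e by omega)]
          calc S < (r + 1) * (r + 1) := hrS
            _ ≤ (r + 1) * e := Nat.mul_le_mul_left _ hre
        omega
      · intro hEq
        have hqe : S / e = e := by
          have hmm : S / e * (S / e) = S / e * e := by rw [hdc, hEq]
          exact Nat.eq_of_mul_eq_mul_left (by omega) hmm
        have hbig : (r + 1) * (r + 1) ≤ e * e := Nat.mul_le_mul hre hre
        rw [hqe] at hEq
        omega
  rw [hstep1, hbij]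
  have hsplit := Finset.card_filter_add_card_filter_not (s := pvDivs S) (p := fun d => d ≤ r)
  omega

-- A counts one divisor fewer than pvDivs: S itself
theorem pv_below_card (S : Nat) (hS : 1 ≤ S) :
    ((Finset.Ico 1 S).filter (fun d => d ∣ S)).card = (pvDivs S).card - 1
      ∧ 1 ≤ (pvDivs S).card := by
  have hSin : S ∈ pvDivs S := (pv_mem_divs S S hS).mpr ⟨dvd_refl S, hS⟩
  have he : (Finset.Ico 1 S).filter (fun d => d ∣ S) = (pvDivs S).erase S := by
    ext d
    simp only [Finset.mem_filter, Finset.mem_Ico, Finset.mem_erase, pv_mem_divs S d hS]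
    constructor
    · rintro ⟨⟨h1, h2⟩, h3⟩; exact ⟨by omega, h3, h1⟩
    · rintro ⟨hne, h3, h1⟩
      have := Nat.le_of_dvd (by omega) h3
      exact ⟨⟨h1, by omega⟩, h3⟩
  constructor
  · rw [he, Finset.card_erase_of_mem hSin]
  · exact Finset.card_pos.mpr ⟨S, hSin⟩

-- ===== VERDICT (by name: the statement is the Claim_ definition above) =====
theorem challenge_sum_nums_prime_spec : Claim_equal_challenge_sum_nums_prime := by
  intro w _
  unfold Spec_challenge_sum_nums_prime challenge_sum_nums_prime challenge_sum_nums_prime_alt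
  simp only []
  have hds := pv_digit_sum_eq w.toList 0
  rw [Nat.cast_zero, pv_total_eq w] at hds
  rw [hds]
  set S : Nat := ("0123456789".toList).foldl
    (fun acc d => acc + (d.toNat - 48) * PySem.Str.count w (String.ofList [d])) 0 with hSdef
  rw [pv_acount_eq S, pv_altLoop_eq S 1 0]
  by_cases h0 : S = 0
  · rw [h0]
    simp [pvF]
  · have h1 : 1 ≤ S := by omega
    rw [Nat.zero_add, pv_pairing S h1]
    obtain ⟨hcard, hpos⟩ := pv_below_card S h1
    rw [hcard]
    by_cases hD : (pvDivs S).card = 3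
    · rw [hD]; norm_num
    · have hne : ¬ (((((pvDivs S).card - 1 : Nat)) : Int) = 2) := by omega
      have hne2 : ((pvDivs S).card == 3) = false := by
        simp [hD]
      rw [hne2]
      simp only [beq_iff_eq]
      rw [if_neg (by exact_mod_cast hne)]
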